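-- pv_equiv track=rewrite | github.com/jellyfishing2346/TIP-class-assignments | Week-01/hackerrank/standard-version-b/first-repeating-string.py | first_repeating_substring
-- ===== SOURCE A (Python) =====
-- from collections import defaultdict
--
-- def first_repeating_substring(s, k):
--     # Write your code here
--     counting = defaultdict(int)
--     for j in range(len(s) - k + 1):
--         string = s[j:j + k]
--         counting[string] += 1
--     for m in range(len(s) - k + 1):
--         string = s[m:m + k]
--         if counting[string] == 2:
--             return m
--     return -1
-- ===== SOURCE B (Python) =====
-- def first_repeating_substring(s, k):
--     # One pass: record, per distinct substring, its first position and its count;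
--     # then take the minimum first position among substrings occurring exactly twice.
--     first = {}
--     count = {}
--     for j in range(len(s) - k + 1):
--         sub = s[j:j + k]
--         if sub not in first:
--             first[sub] = j
--         count[sub] = count.get(sub, 0) + 1
--     best = -1
--     for sub, c in count.items():
--         if c == 2:
--             pos = first[sub]
--             if best == -1 or pos < best:
--                 best = pos
--     return best
-- ===== Notes on version B (the rewrite author's own statement) =====
-- stated objective: alternative
-- what changed: A's second full scan over every window position (re-slicing and re-hashing each length-k substring) is removed: B's single pass additionally records each substring's first position in a dict, and the answer is the minimum recorded first position among substrings counted exactly twice (a scan over the distinct substrings instead of over the string).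
import Mathlib
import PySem

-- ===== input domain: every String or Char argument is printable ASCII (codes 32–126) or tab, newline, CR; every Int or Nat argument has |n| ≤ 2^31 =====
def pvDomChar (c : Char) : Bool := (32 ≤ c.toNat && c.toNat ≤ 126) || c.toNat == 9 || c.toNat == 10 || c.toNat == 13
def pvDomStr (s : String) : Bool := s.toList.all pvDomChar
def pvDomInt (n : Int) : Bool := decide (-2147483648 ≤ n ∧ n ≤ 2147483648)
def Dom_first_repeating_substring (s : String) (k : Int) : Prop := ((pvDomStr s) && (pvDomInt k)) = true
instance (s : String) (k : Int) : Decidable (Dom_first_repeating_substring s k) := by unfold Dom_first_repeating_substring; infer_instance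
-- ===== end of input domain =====

-- B replaces A's second scan over all positions of the string by a dict pass that also records
-- each substring's first position, then takes the minimum first position among substrings
-- counted exactly twice — the second slicing pass over the string disappears
-- (objective: alternative; return value only, neither side mutates its input).

-- shared helper: the substring s[j:j+k] both Pythons compute
def subF (s : String) (k : Int) (j : Int) : String :=
  PySem.Str.slice s (some j) (some (j + k))

-- ===== PORT A =====
-- A's second loop with its early return, as structural recursion over the range list
def firstLoopA (counting : PySem.Dict String Int) (s : String) (k : Int) : List Int → Int
  | [] => -1
  | m :: rest =>
      if counting.getD (subF s k m) 0 == 2 then m else firstLoopA counting s k rest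

def first_repeating_substring (s : String) (k : Int) : Int :=
  let counting := (PySem.List.pyRange 0 (PySem.Str.len s - k + 1) 1).foldl
      (fun d j => d.modify (subF s k j) 0 (· + 1)) PySem.Dict.empty
  firstLoopA counting s k (PySem.List.pyRange 0 (PySem.Str.len s - k + 1) 1)

-- ===== PORT B =====
def first_repeating_substring_alt (s : String) (k : Int) : Int :=
  -- one pass building the two dicts `first` and `count` of Source B
  let fc := (PySem.List.pyRange 0 (PySem.Str.len s - k + 1) 1).foldl
      (fun (fc : PySem.Dict String Int × PySem.Dict String Int) j =>
        (if fc.1.contains (subF s k j) then fc.1 else fc.1.insert (subF s k j) j,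
         fc.2.insert (subF s k j) (fc.2.getD (subF s k j) 0 + 1)))
      (PySem.Dict.empty, PySem.Dict.empty)
  -- `for sub, c in count.items(): …` (first[sub] is always present, so getD 0 is exact here)
  fc.2.items.foldl (fun best p =>
      if p.2 == 2 then
        let pos := fc.1.getD p.1 0
        if best == -1 || pos < best then pos else best
      else best) (-1)

-- ===== PRECONDITION & SPEC =====
def Spec_first_repeating_substring (s : String) (k : Int) (out : Int) : Prop := out = first_repeating_substring_alt s k
instance (s : String) (k : Int) (out : Int) : Decidable (Spec_first_repeating_substring s k out) := by unfold Spec_first_repeating_substring; infer_instance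

-- ===== CLAIM (what is proved, stated in full; the proofs are below) =====
def Claim_equal_first_repeating_substring : Prop := ∀ (s : String) (k : Int), Dom_first_repeating_substring s k → Spec_first_repeating_substring s k (first_repeating_substring s k)

-- ===== LEMMAS AND PROOFS =====

-- min of a nonempty Int list, with -1 for the empty list (the common shape of both results)
def myMin : List Int → Int
  | [] => -1
  | x :: t => t.foldl min x

theorem myMin_mem (l : List Int) (h : l ≠ []) : myMin l ∈ l := by
  match l with
  | [] => exact absurd rfl h
  | x :: t =>
      rcases PySem.List.foldl_min_mem t x with h1 | h1
      · simp [myMin, h1]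
      · simp [myMin, h1]

theorem myMin_le (l : List Int) : ∀ y ∈ l, myMin l ≤ y := by
  match l with
  | [] => intro y hy; simp at hy
  | x :: t =>
      intro y hy
      rcases List.mem_cons.mp hy with rfl | hy
      · exact (PySem.List.foldl_min_le t y).1
      · exact (PySem.List.foldl_min_le t x).2 y hy

theorem myMin_eq_of (u v : List Int)
    (h1 : ∀ c ∈ v, c ∈ u) (h2 : ∀ j ∈ u, ∃ c ∈ v, c ≤ j) : myMin u = myMin v := by
  match u, v with
  | [], [] => rfl
  | [], c :: v => exact absurd (h1 c (by simp)) (by simp)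
  | j :: u, v =>
      have hne : v ≠ [] := by
        rcases h2 j (by simp) with ⟨c, hc, _⟩
        intro h; subst h; simp at hc
      have hmv := myMin_mem v hne
      have hle1 : myMin (j :: u) ≤ myMin v := myMin_le _ _ (h1 _ hmv)
      rcases h2 _ (myMin_mem (j :: u) (by simp)) with ⟨c, hc, hcle⟩
      exact le_antisymm hle1 (le_trans (myMin_le v c hc) hcle)

theorem foldl_min_of_le (r : List Int) (x : Int) (h : ∀ y ∈ r, x ≤ y) : r.foldl min x = x := by
  rcases PySem.List.foldl_min_mem r x with h1 | h1
  · exact h1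
  · exact le_antisymm (PySem.List.foldl_min_le r x).1 (h _ h1)

theorem firstLoopA_eq (d : PySem.Dict String Int) (s : String) (k : Int) (l : List Int) :
    firstLoopA d s k l = (l.find? (fun j => d.getD (subF s k j) 0 == 2)).getD (-1) := by
  induction l with
  | nil => simp [firstLoopA]
  | cons m rest ih =>
      by_cases h : d.getD (subF s k m) 0 == 2
      · simp [firstLoopA, h, List.find?]
      · simp only [Bool.not_eq_true] at h
        simp [firstLoopA, h, List.find?, ih]

theorem find?_getD_as_myMin (l : List Int) (p : Int → Bool) (hp : l.Pairwise (· < ·)) :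
    (l.find? p).getD (-1) = myMin (l.filter p) := by
  induction l with
  | nil => simp [myMin]
  | cons x t ih =>
      rcases List.pairwise_cons.mp hp with ⟨hx, ht⟩
      by_cases h : p x
      · simp only [List.find?, h, List.filter_cons]
        simp [myMin]
        exact (foldl_min_of_le _ x (fun y hy => le_of_lt (hx y (List.mem_of_mem_filter hy)))).symm
      · simp only [Bool.not_eq_true] at h
        simp [List.find?, h, ih ht]

theorem firstDict_get? (s : String) (k : Int) (l : List Int) (d : PySem.Dict String Int) (t : String) :
    (l.foldl (fun f j => if f.contains (subF s k j) then f else f.insert (subF s k j) j) d).get? t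
      = (d.get? t).or (l.find? (fun j => subF s k j == t)) := by
  induction l generalizing d with
  | nil => simp
  | cons j l ih =>
      simp only [List.foldl_cons, List.find?]
      by_cases hc : d.contains (subF s k j)
      · rw [if_pos hc, ih]
        by_cases ht : subF s k j == t
        · have ht' : subF s k j = t := by simpa using ht
          subst ht'
          have : ∃ v, d.get? (subF s k j) = some v := by
            rcases h : d.get? (subF s k j) with _ | v
            · exact absurd ((PySem.Dict.get?_eq_none_iff_contains d _).mp h) (by simp [hc])
            · exact ⟨v, rfl⟩
          rcases this with ⟨v, hv⟩
          simp [hv]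
        · simp only [Bool.not_eq_true] at ht
          simp [ht]
      · rw [if_neg hc, ih]
        have hnone : d.get? (subF s k j) = none :=
          (PySem.Dict.get?_eq_none_iff_contains d _).mpr (by simpa using hc)
        by_cases ht : subF s k j == t
        · have ht' : subF s k j = t := by simpa using ht
          subst ht'
          simp [hnone]
        · have ht' : ¬ (t = subF s k j) := fun h => by simp [h] at ht
          simp only [Bool.not_eq_true] at ht
          rw [PySem.Dict.get?_insert]
          simp [ht, ht']

theorem sentinel_min_aux (t : List Int) (x : Int) (hx : 0 ≤ x) (h : ∀ c ∈ t, 0 ≤ c) :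
    t.foldl (fun best pos => if best == -1 || pos < best then pos else best) x = t.foldl min x := by
  induction t generalizing x with
  | nil => rfl
  | cons c t ih =>
      have hc := h c (by simp)
      have hxne : (x == -1) = false := by simp; omega
      simp only [List.foldl_cons, hxne, Bool.false_or]
      have heq : (if decide (c < x) = true then c else x) = min x c := by
        simp only [decide_eq_true_eq]
        split_ifs with h1 <;> omega
      rw [heq]
      exact ih _ (le_min hx hc) (fun y hy => h y (by simp [hy]))

theorem sentinel_min (cand : List Int) (h : ∀ c ∈ cand, 0 ≤ c) :
    cand.foldl (fun best pos => if best == -1 || pos < best then pos else best) (-1) = myMin cand := by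
  match cand with
  | [] => rfl
  | x :: t =>
      simp only [List.foldl_cons]
      have hcond : ((-1 : Int) == -1 || x < -1) = true := by simp
      rw [hcond]
      exact sentinel_min_aux t x (h x (by simp)) (fun y hy => h y (by simp [hy]))

-- first occurrence: find? on an ascending list returns a member with the property, minimal
theorem first_occ (s : String) (k : Int) (L : List Int) (hL : L.Pairwise (· < ·))
    (t : String) (j : Int) (hj : j ∈ L) (hjt : subF s k j = t) :
    ∃ j1, L.find? (fun j => subF s k j == t) = some j1 ∧ j1 ∈ L ∧ subF s k j1 = t ∧ j1 ≤ j := by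
  have hsome : (L.find? (fun j => subF s k j == t)).isSome := by
    rw [List.find?_isSome]
    exact ⟨j, hj, by simp [hjt]⟩
  rcases Option.isSome_iff_exists.mp hsome with ⟨j1, hj1⟩
  refine ⟨j1, hj1, List.mem_of_find?_eq_some hj1, by simpa using List.find?_some hj1, ?_⟩
  have := find?_getD_as_myMin L (fun j => subF s k j == t) hL
  rw [hj1] at this
  simp only [Option.getD_some] at this
  rw [this]
  exact myMin_le _ j (List.mem_filter.mpr ⟨hj, by simp [hjt]⟩)

-- the paired fold of port B is the pair of its component folds (foldl_prod_mk, specialised)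
theorem split_fold (s : String) (k : Int) (l : List Int)
    (a b : PySem.Dict String Int) :
    l.foldl (fun fc j =>
        (if fc.1.contains (subF s k j) then fc.1 else fc.1.insert (subF s k j) j,
         fc.2.insert (subF s k j) (fc.2.getD (subF s k j) 0 + 1))) (a, b)
      = (l.foldl (fun f j => if f.contains (subF s k j) then f else f.insert (subF s k j) j) a,
         l.foldl (fun c j => c.insert (subF s k j) (c.getD (subF s k j) 0 + 1)) b) := by
  induction l generalizing a b with
  | nil => rfl
  | cons j l ih => simp only [List.foldl_cons, ih]

theorem main_eq (s : String) (k : Int) :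
    first_repeating_substring s k = first_repeating_substring_alt s k := by
  unfold first_repeating_substring first_repeating_substring_alt
  dsimp only
  rw [split_fold]
  set L := PySem.List.pyRange 0 (PySem.Str.len s - k + 1) 1 with hLdef
  set subs := L.map (subF s k) with hsubs
  have hL : L.Pairwise (· < ·) := PySem.List.pairwise_lt_pyRange_one 0 _
  have hL0 : ∀ j ∈ L, 0 ≤ j := by
    intro j hj
    exact (PySem.List.mem_pyRange_one.mp hj).1
  -- A's counting dict is Counter(subs)
  have hC : L.foldl (fun d j => d.modify (subF s k j) 0 (· + 1)) PySem.Dict.empty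
      = PySem.Dict.counter subs := by
    rw [PySem.Dict.counter_eq_foldl, hsubs, List.foldl_map]
  -- B's count dict is the same Counter
  have hC2 : L.foldl (fun c j => c.insert (subF s k j) (c.getD (subF s k j) 0 + 1)) PySem.Dict.empty
      = PySem.Dict.counter subs := by
    rw [← PySem.Dict.foldl_insert_getD_add_one_eq_counter, hsubs, List.foldl_map]
  -- B's first dict lookup
  set F := L.foldl (fun f j => if f.contains (subF s k j) then f else f.insert (subF s k j) j)
      PySem.Dict.empty with hFdef
  have hFget : ∀ t, F.get? t = L.find? (fun j => subF s k j == t) := by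
    intro t
    rw [hFdef, firstDict_get?]
    simp
  -- characterise F.getD on substrings that occur
  have hFocc : ∀ j ∈ L, ∃ j1, F.getD (subF s k j) 0 = j1 ∧ j1 ∈ L ∧
      subF s k j1 = subF s k j ∧ j1 ≤ j := by
    intro j hj
    rcases first_occ s k L hL (subF s k j) j hj rfl with ⟨j1, hfind, hmem, hval, hle⟩
    refine ⟨j1, ?_, hmem, hval, hle⟩
    rw [PySem.Dict.getD_eq_get?_getD, hFget, hfind]
    rfl
  -- A side to myMin
  rw [firstLoopA_eq, hC]
  have hpred : (fun j => (PySem.Dict.counter subs).getD (subF s k j) 0 == 2)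
      = (fun j => ((List.count (subF s k j) subs : Int) == 2)) := by
    funext j
    rw [PySem.Dict.getD_counter]
  rw [hpred, find?_getD_as_myMin _ _ hL]
  -- B side to myMin
  rw [hC2, PySem.Dict.items_counter, List.foldl_map]
  dsimp only
  rw [PySem.List.foldl_if_eq_foldl_filter
        (p := fun t => ((List.count t subs : Int) == 2))
        (f := fun best t => if best == -1 || F.getD t 0 < best then F.getD t 0 else best)]
  rw [← List.foldl_map (f := fun t => F.getD t 0)
        (g := fun best pos => if best == -1 || pos < best then pos else best)]
  set q : String → Bool := fun t => ((List.count t subs : Int) == 2) with hq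
  set cand := ((PySem.Set.ofList subs).filter q).map (fun t => F.getD t 0) with hcand
  have hcand_mem : ∀ c ∈ cand, ∃ t j1, t ∈ subs ∧ q t = true ∧ c = j1 ∧ j1 ∈ L ∧ subF s k j1 = t := by
    intro c hc
    rcases List.mem_map.mp hc with ⟨t, htf, rfl⟩
    have htS := List.mem_filter.mp htf
    have htsubs : t ∈ subs := (PySem.Set.mem_ofList _ _).mp htS.1
    rcases List.mem_map.mp (hsubs ▸ htsubs) with ⟨j, hj, rfl⟩
    rcases hFocc j hj with ⟨j1, hgetD, hmem, hval, _⟩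
    exact ⟨subF s k j, j1, htsubs, htS.2, hgetD, hmem, hval⟩
  have hpos : ∀ c ∈ cand, 0 ≤ c := by
    intro c hc
    rcases hcand_mem c hc with ⟨t, j1, _, _, rfl, hmem, _⟩
    exact hL0 _ hmem
  rw [sentinel_min _ hpos]
  -- both are myMin; identify the two candidate lists
  refine myMin_eq_of _ _ ?_ ?_
  · intro c hc
    rcases hcand_mem c hc with ⟨t, j1, _, hqt, rfl, hmem, hval⟩
    refine List.mem_filter.mpr ⟨hmem, ?_⟩
    rw [hval]
    exact hqt
  · intro j hj
    have hjL := (List.mem_filter.mp hj).1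
    have hjq : q (subF s k j) = true := (List.mem_filter.mp hj).2
    have htsubs : subF s k j ∈ subs := hsubs ▸ List.mem_map.mpr ⟨j, hjL, rfl⟩
    rcases hFocc j hjL with ⟨j1, hgetD, _, _, hle⟩
    refine ⟨j1, ?_, hle⟩
    rw [hcand]
    refine List.mem_map.mpr ⟨subF s k j, ?_, hgetD⟩
    exact List.mem_filter.mpr ⟨(PySem.Set.mem_ofList _ _).mpr htsubs, hjq⟩

-- ===== VERDICT (by name: the statement is the Claim_ definition above) =====
theorem first_repeating_substring_spec : Claim_equal_first_repeating_substring := by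
  intro s k _
  unfold Spec_first_repeating_substring
  exact main_eq s k
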